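-- pv_equiv track=rewrite | github.com/MrBrantCode/unitest_baseline | mut_generate/mist_train_cf/cf_11428/solution.py | vowels_followed_by_consonant
-- ===== SOURCE A (Python) =====
-- def vowels_followed_by_consonant(sentence):
--     vowels = "aeiou"
--     consonants = "bcdfghjklmnpqrstvwxyz"
--     sentence = sentence.lower()
--
--     for i in range(len(sentence)-1):
--         if sentence[i] in vowels and sentence[i+1] not in consonants:
--             return False
--
--     return True
-- ===== SOURCE B (Python) =====
-- def vowels_followed_by_consonant(sentence):
--     # Stage 1: classify every character as vowel/consonant/other into a string.
--     cls = "".join("v" if ch in "aeiou" else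
--                   "c" if ch in "bcdfghjklmnpqrstvwxyz" else
--                   "x" for ch in sentence.lower())
--     # Stage 2: the property fails exactly when a vowel is immediately
--     # followed by a vowel or by an 'other' character.
--     return "vv" not in cls and "vx" not in cls
-- ===== Notes on version B (the rewrite author's own statement) =====
-- stated objective: alternative
-- what changed: Two staged passes: first map every character to a class string (v/c/x), then decide by substring containment ('vv'/'vx' must not occur) instead of A's index loop testing each adjacent pair with two membership checks.
import Mathlib
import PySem

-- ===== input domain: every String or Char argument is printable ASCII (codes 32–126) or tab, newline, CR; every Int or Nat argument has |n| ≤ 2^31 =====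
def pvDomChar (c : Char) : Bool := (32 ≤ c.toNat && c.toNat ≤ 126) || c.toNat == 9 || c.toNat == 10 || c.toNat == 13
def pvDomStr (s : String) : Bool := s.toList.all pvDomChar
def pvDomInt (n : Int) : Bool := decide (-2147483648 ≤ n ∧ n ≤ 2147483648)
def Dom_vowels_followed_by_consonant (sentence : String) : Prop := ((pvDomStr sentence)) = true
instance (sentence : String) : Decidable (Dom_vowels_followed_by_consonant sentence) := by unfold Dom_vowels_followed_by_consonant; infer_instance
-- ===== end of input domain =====

-- B classifies each character into a v/c/x string, then decides by substring containment
-- ("vv"/"vx" must not occur) instead of A's index loop over adjacent pairs (alternative; same cost).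

-- ===== PORT A =====
-- A's loop 'for i in range(len(sentence)-1): if … return False' as index recursion; indices are in range.
def vfcA_loop (s : List Char) (i : Nat) : Bool :=
  if _h : i + 1 < s.length then
    if ("aeiou".toList.contains (s.getD i ' ')) &&
       !("bcdfghjklmnpqrstvwxyz".toList.contains (s.getD (i+1) ' ')) then
      false
    else
      vfcA_loop s (i+1)
  else
    true
termination_by s.length - i

def vowels_followed_by_consonant (sentence : String) : Bool :=
  vfcA_loop (PySem.Str.lower sentence).toList 0

-- ===== PORT B =====
-- the classification of one character (the chained conditional inside B's join)
def vfcClassify (ch : Char) : Char :=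
  if "aeiou".toList.contains ch then 'v'
  else if "bcdfghjklmnpqrstvwxyz".toList.contains ch then 'c'
  else 'x'

def vowels_followed_by_consonant_alt (sentence : String) : Bool :=
  -- "".join(classify(ch) for ch in sentence.lower()) is the map below; 'sub in cls' is PySem.Str.isIn
  let cls : String := String.ofList ((PySem.Str.lower sentence).toList.map vfcClassify)
  !(PySem.Str.isIn "vv" cls) && !(PySem.Str.isIn "vx" cls)

-- ===== PRECONDITION & SPEC =====
def Spec_vowels_followed_by_consonant (sentence : String) (out : Bool) : Prop := out = vowels_followed_by_consonant_alt sentence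
instance (sentence : String) (out : Bool) : Decidable (Spec_vowels_followed_by_consonant sentence out) := by unfold Spec_vowels_followed_by_consonant; infer_instance

-- ===== CLAIM =====
def Claim_equal_vowels_followed_by_consonant : Prop := ∀ (sentence : String), Dom_vowels_followed_by_consonant sentence → Spec_vowels_followed_by_consonant sentence (vowels_followed_by_consonant sentence)

-- ===== LEMMAS AND PROOFS =====

-- the per-pair test of A's loop body
def vfcBad (a b : Char) : Bool :=
  ("aeiou".toList.contains a) && !("bcdfghjklmnpqrstvwxyz".toList.contains b)

-- reference recursion over adjacent pairs
def vfcScan : List Char → Bool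
  | a :: b :: t => !(vfcBad a b) && vfcScan (b :: t)
  | _ => true

lemma vfcA_loop_eq_scan (s : List Char) (i : Nat) :
    vfcA_loop s i = vfcScan (s.drop i) := by
  generalize hk : s.length - i = k
  induction k generalizing i with
  | zero =>
    rw [vfcA_loop]
    have hlen : s.length ≤ i := by omega
    simp [List.drop_eq_nil_of_le hlen, show ¬ i + 1 < s.length by omega, vfcScan]
  | succ k ih =>
    rw [vfcA_loop]
    by_cases h : i + 1 < s.length
    · have hi : i < s.length := by omega
      have hdrop : s.drop i = s[i] :: s[i+1] :: s.drop (i+2) := by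
        rw [List.drop_eq_getElem_cons hi, List.drop_eq_getElem_cons h]
      have hdrop1 : s.drop (i+1) = s[i+1] :: s.drop (i+2) := by
        rw [List.drop_eq_getElem_cons h]
      have hgi : s.getD i ' ' = s[i] := List.getD_eq_getElem s ' ' hi
      have hgi1 : s.getD (i+1) ' ' = s[i+1] := List.getD_eq_getElem s ' ' h
      rw [dif_pos h, hdrop, hgi, hgi1, ih (i+1) (by omega), hdrop1]
      simp only [vfcScan, vfcBad]
      by_cases hb : ("aeiou".toList.contains s[i]) && !("bcdfghjklmnpqrstvwxyz".toList.contains s[i+1]) <;>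
        simp [hb]
    · rw [dif_neg h]
      rcases Nat.lt_or_ge i s.length with hi | hi
      · have hdrop : s.drop i = [s[i]] := by
          rw [List.drop_eq_getElem_cons hi, List.drop_eq_nil_of_le (by omega)]
        simp [hdrop, vfcScan]
      · simp [List.drop_eq_nil_of_le hi, vfcScan]

-- an infix of length 2 in c :: cs is either the first pair or an infix of cs
lemma infix2_cons (x y c : Char) (cs : List Char) :
    ([x, y] <:+: (c :: cs)) ↔ ((∃ d cs', cs = d :: cs' ∧ x = c ∧ y = d) ∨ [x, y] <:+: cs) := by
  rw [List.infix_cons_iff]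
  constructor
  · rintro (hp | hi)
    · left
      rcases hp with ⟨t, ht⟩
      cases cs with
      | nil => simp at ht
      | cons d cs' =>
        refine ⟨d, cs', rfl, ?_, ?_⟩ <;> (simp at ht; tauto)
    · right; exact hi
  · rintro (⟨d, cs', rfl, rfl, rfl⟩ | hi)
    · left; exact ⟨cs', rfl⟩
    · right; exact hi

lemma vowel_not_consonant (b : Char) (h : "aeiou".toList.contains b = true) :
    "bcdfghjklmnpqrstvwxyz".toList.contains b = false := by
  have hv : "aeiou".toList = ['a','e','i','o','u'] := rfl
  rw [hv, List.contains_iff_mem] at h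
  simp only [List.mem_cons, List.not_mem_nil, or_false] at h
  rcases h with h | h | h | h | h <;> subst h <;> decide

lemma classify_eq_v_iff (a : Char) :
    vfcClassify a = 'v' ↔ "aeiou".toList.contains a = true := by
  unfold vfcClassify
  split_ifs with h1 h2
  · exact iff_of_true rfl h1
  · exact iff_of_false (by decide) h1
  · exact iff_of_false (by decide) h1

lemma classify_vx_iff (b : Char) :
    (vfcClassify b = 'v' ∨ vfcClassify b = 'x') ↔ "bcdfghjklmnpqrstvwxyz".toList.contains b = false := by
  unfold vfcClassify
  split_ifs with h1 h2
  · exact iff_of_true (Or.inl rfl) (vowel_not_consonant b h1)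
  · exact iff_of_false (by decide) (by rw [h2]; decide)
  · exact iff_of_true (Or.inr rfl) (by simpa using h2)

lemma vfcBad_iff_classify (a b : Char) :
    vfcBad a b = true ↔
      (vfcClassify a = 'v' ∧ vfcClassify b = 'v') ∨ (vfcClassify a = 'v' ∧ vfcClassify b = 'x') := by
  unfold vfcBad
  rw [← and_or_left, classify_eq_v_iff, classify_vx_iff]
  simp

-- B's two containment tests, negated, equal the pairwise scan
lemma scan_eq_isIn (l : List Char) :
    vfcScan l = (!(PySem.Chars.isIn ['v','v'] (l.map vfcClassify)) &&
                 !(PySem.Chars.isIn ['v','x'] (l.map vfcClassify))) := by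
  induction l with
  | nil =>
    have h1 : PySem.Chars.isIn ['v','v'] ([] : List Char) = false := by
      rw [PySem.Chars.isIn_eq_false_iff]; intro h; have := h.length_le; simp at this
    have h2 : PySem.Chars.isIn ['v','x'] ([] : List Char) = false := by
      rw [PySem.Chars.isIn_eq_false_iff]; intro h; have := h.length_le; simp at this
    simp [vfcScan, h1, h2]
  | cons a t ih =>
    cases t with
    | nil =>
      have h1 : ∀ y : Char, PySem.Chars.isIn ['v', y] [vfcClassify a] = false := by
        intro y
        rw [PySem.Chars.isIn_eq_false_iff]; intro h; have := h.length_le; simp at this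
      simp [vfcScan, h1]
    | cons b t' =>
      simp only [vfcScan, List.map] at *
      rw [ih]
      have key : ∀ (y : Char),
          PySem.Chars.isIn ['v', y] (vfcClassify a :: vfcClassify b :: t'.map vfcClassify)
          = ((decide (vfcClassify a = 'v') && decide (vfcClassify b = y)) ||
             PySem.Chars.isIn ['v', y] (vfcClassify b :: t'.map vfcClassify)) := by
        intro y
        rw [Bool.eq_iff_iff]
        simp only [PySem.Chars.isIn_iff_infix, Bool.or_eq_true, Bool.and_eq_true, decide_eq_true_eq]
        rw [infix2_cons]
        constructor
        · rintro (⟨d, cs', hcs, hx, hy⟩ | hi)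
          · left
            have hd : d = vfcClassify b := by injection hcs with h1 _; exact h1.symm
            exact ⟨hx.symm, by rw [hy, hd]⟩
          · right; exact hi
        · rintro (⟨hx, hy⟩ | hi)
          · left; exact ⟨vfcClassify b, t'.map vfcClassify, rfl, hx.symm, hy.symm⟩
          · right; exact hi
      rw [key 'v', key 'x']
      by_cases hb : vfcBad a b = true
      · rcases (vfcBad_iff_classify a b).mp hb with ⟨h1, h2⟩ | ⟨h1, h2⟩ <;> simp [hb, h1, h2]
      · have hnb : ¬((vfcClassify a = 'v' ∧ vfcClassify b = 'v') ∨
                     (vfcClassify a = 'v' ∧ vfcClassify b = 'x')) :=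
          fun h => hb ((vfcBad_iff_classify a b).mpr h)
        rw [not_or] at hnb; obtain ⟨hn1, hn2⟩ := hnb
        simp only [Bool.not_eq_true] at hb
        by_cases ha : vfcClassify a = 'v'
        · have hv : vfcClassify b ≠ 'v' := fun h => hn1 ⟨ha, h⟩
          have hx : vfcClassify b ≠ 'x' := fun h => hn2 ⟨ha, h⟩
          simp [hb, ha, hv, hx]
        · simp [hb, ha]

-- ===== VERDICT =====
theorem vowels_followed_by_consonant_spec : Claim_equal_vowels_followed_by_consonant := by
  intro sentence _
  unfold Spec_vowels_followed_by_consonant vowels_followed_by_consonant vowels_followed_by_consonant_alt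
  simp only [PySem.Str.isIn_eq]
  rw [vfcA_loop_eq_scan, List.drop_zero, scan_eq_isIn]
  simp [String.toList_ofList]
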